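-- pv_equiv track=rewrite | github.com/caliburlabs/eda-parse | tools/convert_curation_to_golden.py | _extract_authorities
-- ===== SOURCE A (Python) =====
-- from collections.abc import Iterable, Mapping
-- from typing import Any
--
-- JsonObject = dict[str, Any]
--
-- def _extract_authorities(rich_case: Mapping[str, Any]) -> list[JsonObject]:
--     raw_entries = _required_list(rich_case.get("verbatim_diagnoses", []), "verbatim_diagnoses")
--     seen: set[tuple[str, str, str]] = set()
--     authorities: list[JsonObject] = []
--     for raw_entry in raw_entries:
--         entry = _as_object(raw_entry, "verbatim diagnosis")
--         author = _optional_str(entry.get("author"))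
--         name = _optional_str(entry.get("author_name"))
--         role = _optional_str(entry.get("role"))
--         fingerprint = (author or "", name or "", role or "")
--         if fingerprint in seen:
--             continue
--         seen.add(fingerprint)
--
--         authority: JsonObject = {}
--         if author:
--             authority["github"] = author
--         if name:
--             authority["name"] = name
--         if role:
--             authority["role"] = role
--         if authority:
--             authorities.append(authority)
--     return authorities
--
-- def _as_object(value: Any, label: str) -> JsonObject:
--     if not isinstance(value, dict):
--         raise ValueError(f"{label} must be an object")
--     return {str(key): item for key, item in value.items()}
--
-- def _required_list(value: Any, label: str) -> list[Any]:
--     if not isinstance(value, list):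
--         raise ValueError(f"{label} must be a list")
--     return value
--
-- def _optional_str(value: Any) -> str | None:
--     return value if isinstance(value, str) and value else None
-- ===== SOURCE B (Python) =====
-- def _extract_authorities(rich_case):
--     raw_entries = rich_case.get("verbatim_diagnoses", [])
--     if not isinstance(raw_entries, list):
--         raise ValueError("verbatim_diagnoses must be a list")
--     # pass 1: validate every entry and compute its fingerprint
--     pending = []
--     for raw_entry in raw_entries:
--         if not isinstance(raw_entry, dict):
--             raise ValueError("verbatim diagnosis must be an object")
--         entry = {str(key): item for key, item in raw_entry.items()}
--         pending.append(tuple(_clean(entry.get(field))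
--                              for field in ("author", "author_name", "role")))
--     # pass 2: quicksort-style dedup without any auxiliary index structure:
--     # repeatedly take the head and filter out every later duplicate of it
--     uniq = []
--     while pending:
--         head = pending[0]
--         pending = [fp for fp in pending[1:] if fp != head]
--         uniq.append(head)
--     # pass 3: rebuild each authority from its fingerprint, dropping empty ones
--     return [authority
--             for authority in ({label: text
--                                for label, text in zip(("github", "name", "role"), fp)
--                                if text}
--                               for fp in uniq)
--             if authority]
--
--
-- def _clean(value):
--     return value if isinstance(value, str) and value else ""
-- ===== Notes on version B (the rewrite author's own statement) =====
-- stated objective: alternative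
-- what changed: B replaces A's single stateful loop with a seen-set by three staged passes: a map pass computing every entry's fingerprint, a filter-out-remaining-duplicates loop (take the head, drop all its later copies, repeat -- no set or dict at all), and a rebuild pass deriving each authority dict from its fingerprint alone.
import Mathlib
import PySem

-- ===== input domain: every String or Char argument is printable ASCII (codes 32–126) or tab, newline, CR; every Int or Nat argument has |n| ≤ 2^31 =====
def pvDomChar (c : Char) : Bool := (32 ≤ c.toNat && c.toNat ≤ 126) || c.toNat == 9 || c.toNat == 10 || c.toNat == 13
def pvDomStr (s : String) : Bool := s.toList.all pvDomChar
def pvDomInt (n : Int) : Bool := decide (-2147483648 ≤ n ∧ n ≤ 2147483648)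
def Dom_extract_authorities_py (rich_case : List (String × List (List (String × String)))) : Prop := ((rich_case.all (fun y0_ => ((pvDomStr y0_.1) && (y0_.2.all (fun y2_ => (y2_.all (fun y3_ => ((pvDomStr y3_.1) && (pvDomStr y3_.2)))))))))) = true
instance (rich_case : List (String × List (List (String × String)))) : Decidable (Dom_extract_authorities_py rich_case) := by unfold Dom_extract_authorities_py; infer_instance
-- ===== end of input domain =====

-- B replaces A's single stateful loop (seen-set + inline dict building) by three staged passes:
-- a fingerprint map pass, a filter-out-later-duplicates dedup loop (no set/dict), and a rebuild pass.


-- ===== PORT A =====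
-- _optional_str: value if it is a non-empty str else None (entry values here are always str)
def pvOptStr (v : Option String) : Option String :=
  match v with
  | some s => if s ≠ "" then some s else none
  | none => none

def extract_authorities_py (rich_case : List (String × List (List (String × String)))) : List (List (String × String)) :=
  let raw_entries := (PySem.Dict.ofList rich_case).getD "verbatim_diagnoses" []
  -- loop state: (seen set of fingerprints, authorities accumulated so far)
  let st := raw_entries.foldl
    (fun (st : PySem.Set (String × String × String) × List (List (String × String))) raw_entry =>
      let entry := PySem.Dict.ofList raw_entry      -- _as_object
      let author := pvOptStr (entry.get? "author")
      let name := pvOptStr (entry.get? "author_name")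
      let role := pvOptStr (entry.get? "role")
      let fingerprint := (author.getD "", name.getD "", role.getD "")
      if PySem.Set.contains st.1 fingerprint then st
      else
        let seen := PySem.Set.add st.1 fingerprint
        -- authority dict built key by key; all keys fresh, so each assignment appends
        let authority : List (String × String) := []
        let authority := match author with | some a => authority ++ [("github", a)] | none => authority
        let authority := match name with | some n => authority ++ [("name", n)] | none => authority
        let authority := match role with | some r => authority ++ [("role", r)] | none => authority
        if authority ≠ [] then (seen, st.2 ++ [authority]) else (seen, st.2))
    (PySem.Set.empty, [])
  st.2

-- ===== PORT B =====
-- _clean: the value if a non-empty str, else ""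
def pvClean (v : Option String) : String :=
  match v with
  | some s => if s ≠ "" then s else ""
  | none => ""

def pvFingerprint (raw_entry : List (String × String)) : String × String × String :=
  let entry := PySem.Dict.ofList raw_entry
  (pvClean (entry.get? "author"), pvClean (entry.get? "author_name"), pvClean (entry.get? "role"))

-- Source B's while loop: take the head, drop all its later copies, recurse on the rest
def pvFilterDedup : List (String × String × String) → List (String × String × String)
  | [] => []
  | x :: rest => x :: pvFilterDedup (rest.filter (fun y => y ≠ x))
termination_by l => l.length
decreasing_by simpa using le_trans (List.length_filter_le _ rest.attach) (by simp)

-- the dict comprehension over the three zipped labelled fields, keeping only truthy texts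
def pvEmit (fp : String × String × String) : List (String × String) :=
  (if fp.1 ≠ "" then [("github", fp.1)] else []) ++
  (if fp.2.1 ≠ "" then [("name", fp.2.1)] else []) ++
  (if fp.2.2 ≠ "" then [("role", fp.2.2)] else [])

def extract_authorities_py_alt (rich_case : List (String × List (List (String × String)))) : List (List (String × String)) :=
  let raw_entries := (PySem.Dict.ofList rich_case).getD "verbatim_diagnoses" []
  let pending := raw_entries.map pvFingerprint
  let uniq := pvFilterDedup pending
  (uniq.map pvEmit).filter (fun authority => authority ≠ [])

-- ===== PRECONDITION & SPEC =====
-- A is total on the typed inputs: its "must be a list" / "must be an object" validations cannot fire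
-- (the types already give a list of string-keyed objects), so this Pre_ — every entry under
-- "verbatim_diagnoses" is a well-formed object — is trivially true and excludes nothing.
def Pre_extract_authorities_py (rich_case : List (String × List (List (String × String)))) : Prop :=
  ∀ entry ∈ (PySem.Dict.ofList rich_case).getD "verbatim_diagnoses" ([] : List (List (String × String))), 0 ≤ entry.length
instance (rich_case : List (String × List (List (String × String)))) : Decidable (Pre_extract_authorities_py rich_case) := by unfold Pre_extract_authorities_py; infer_instance

def pvWitness_extract_authorities_py : (List (String × List (List (String × String)))) :=
  [("verbatim_diagnoses",
    [[("author", "octocat"), ("author_name", "Octo Cat"), ("role", "curator")],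
     [("author", "octocat"), ("author_name", "Octo Cat"), ("role", "curator")],
     [("author_name", "Grace")],
     [("author", ""), ("role", "")]])]

def Spec_extract_authorities_py (rich_case : List (String × List (List (String × String)))) (out : List (List (String × String))) : Prop := out = extract_authorities_py_alt rich_case
instance (rich_case : List (String × List (List (String × String)))) (out : List (List (String × String))) : Decidable (Spec_extract_authorities_py rich_case out) := by unfold Spec_extract_authorities_py; infer_instance

-- ===== CLAIM (what is proved, stated in full; the proofs are below) =====
def Claim_equal_extract_authorities_py : Prop := ∀ (rich_case : List (String × List (List (String × String)))), Dom_extract_authorities_py rich_case → Pre_extract_authorities_py rich_case → Spec_extract_authorities_py rich_case (extract_authorities_py rich_case)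

-- ===== LEMMAS AND PROOFS =====

-- A's per-entry step, reformulated on the fingerprint (proved equal to A's inline step below)
def stepA (st : PySem.Set (String × String × String) × List (List (String × String)))
    (fp : String × String × String) :
    PySem.Set (String × String × String) × List (List (String × String)) :=
  if PySem.Set.contains st.1 fp then st
  else (PySem.Set.add st.1 fp, if pvEmit fp ≠ [] then st.2 ++ [pvEmit fp] else st.2)

def stepB (acc : List (List (String × String))) (fp : String × String × String) :
    List (List (String × String)) :=
  if pvEmit fp ≠ [] then acc ++ [pvEmit fp] else acc

theorem emit_of_opts (x y z : Option String) :
    (match pvOptStr z with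
      | some r => (match pvOptStr y with
          | some n => (match pvOptStr x with | some a => ([] : List (String × String)) ++ [("github", a)] | none => []) ++ [("name", n)]
          | none => (match pvOptStr x with | some a => ([] : List (String × String)) ++ [("github", a)] | none => [])) ++ [("role", r)]
      | none => (match pvOptStr y with
          | some n => (match pvOptStr x with | some a => ([] : List (String × String)) ++ [("github", a)] | none => []) ++ [("name", n)]
          | none => (match pvOptStr x with | some a => ([] : List (String × String)) ++ [("github", a)] | none => []))) =
    pvEmit (pvClean x, pvClean y, pvClean z) := by
  cases x <;> cases y <;> cases z <;>
    simp only [pvOptStr, pvClean, pvEmit] <;> split_ifs <;> simp_all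

theorem getD_opt (x : Option String) : (pvOptStr x).getD "" = pvClean x := by
  cases x <;> simp [pvOptStr, pvClean] <;> split_ifs <;> simp_all

-- Set.add only ever appends: the fold extends the seen list
theorem foldl_add_prefix (fps : List (String × String × String))
    (s : PySem.Set (String × String × String)) :
    ∃ t, fps.foldl PySem.Set.add s = s ++ t := by
  induction fps generalizing s with
  | nil => exact ⟨[], by simp⟩
  | cons fp fps ih =>
    simp only [List.foldl_cons]
    by_cases h : fp ∈ s
    · rw [PySem.Set.add_of_mem h]; exact ih s
    · rw [PySem.Set.add_of_not_mem h]
      obtain ⟨t, ht⟩ := ih (s ++ [fp])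
      exact ⟨fp :: t, by simp [ht]⟩

-- the main loop invariant: A's fold emits exactly the newly-seen fingerprints, in order
theorem loop_eq (fps : List (String × String × String))
    (seen : PySem.Set (String × String × String)) (acc : List (List (String × String))) :
    (fps.foldl stepA (seen, acc)).2 =
      ((fps.foldl PySem.Set.add seen).drop seen.length).foldl stepB acc := by
  induction fps generalizing seen acc with
  | nil => simp
  | cons fp fps ih =>
    simp only [List.foldl_cons]
    by_cases h : fp ∈ seen
    · rw [show stepA (seen, acc) fp = (seen, acc) by simp [stepA, h],
          PySem.Set.add_of_mem h, ih]
    · rw [show stepA (seen, acc) fp = (seen ++ [fp], stepB acc fp) by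
            simp [stepA, stepB, h],
          PySem.Set.add_of_not_mem h, ih]
      obtain ⟨t, ht⟩ := foldl_add_prefix fps (seen ++ [fp])
      rw [ht]
      have h1 : List.drop (List.length (seen ++ [fp])) ((seen ++ [fp]) ++ t) = t :=
        List.drop_left
      have h2 : List.drop (List.length seen) ((seen ++ [fp]) ++ t) = fp :: t := by
        rw [List.append_assoc]
        simpa using (List.drop_left (l₁ := seen) (l₂ := [fp] ++ t))
      rw [h1, h2]
      simp [List.foldl_cons]

-- A's inline step IS stepA on the entry's fingerprint
theorem step_eq (st : PySem.Set (String × String × String) × List (List (String × String)))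
    (raw_entry : List (String × String)) :
    (let entry := PySem.Dict.ofList raw_entry
     let author := pvOptStr (entry.get? "author")
     let name := pvOptStr (entry.get? "author_name")
     let role := pvOptStr (entry.get? "role")
     let fingerprint := (author.getD "", name.getD "", role.getD "")
     if PySem.Set.contains st.1 fingerprint then st
     else
       let seen := PySem.Set.add st.1 fingerprint
       let authority : List (String × String) := []
       let authority := match author with | some a => authority ++ [("github", a)] | none => authority
       let authority := match name with | some n => authority ++ [("name", n)] | none => authority
       let authority := match role with | some r => authority ++ [("role", r)] | none => authority
       if authority ≠ [] then (seen, st.2 ++ [authority]) else (seen, st.2)) =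
    stepA st (pvFingerprint raw_entry) := by
  simp only [pvFingerprint, stepA, getD_opt]
  rw [emit_of_opts]
  split_ifs <;> simp_all

theorem pvFilterDedup_cons (a : String × String × String) (l : List (String × String × String)) :
    pvFilterDedup (a :: l) = a :: pvFilterDedup (l.filter (fun y => y ≠ a)) := by
  rw [pvFilterDedup]

-- seeding fingerprints through Set.add from the left realises pvFilterDedup of the not-yet-seen ones
theorem foldl_add_eq_filterDedup (fps : List (String × String × String))
    (s : PySem.Set (String × String × String)) :
    fps.foldl PySem.Set.add s = s ++ pvFilterDedup (fps.filter (fun y => y ∉ s)) := by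
  induction fps generalizing s with
  | nil => simp [pvFilterDedup]
  | cons x rest ih =>
    simp only [List.foldl_cons, List.filter_cons]
    by_cases h : x ∈ s
    · rw [PySem.Set.add_of_mem h]
      simp only [h, not_true_eq_false, decide_false]
      exact ih s
    · have hf : rest.filter (fun y => decide (y ∉ s ++ [x])) =
          (rest.filter (fun y => decide (y ∉ s))).filter (fun y => decide (y ≠ x)) := by
        rw [List.filter_filter]
        exact List.filter_congr (fun y _ => by
          by_cases h1 : y ∈ s <;> by_cases h2 : y = x <;> simp [h1, h2])
      rw [PySem.Set.add_of_not_mem h, ih (s ++ [x]), hf]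
      simp only [h, not_false_eq_true, decide_true, if_true]
      conv_rhs => rw [pvFilterDedup_cons]
      simp [List.filter_filter]

-- the emission fold over the deduped fingerprints is a map-then-filter
theorem foldl_stepB_eq (fps : List (String × String × String))
    (acc : List (List (String × String))) :
    fps.foldl stepB acc = acc ++ (fps.map pvEmit).filter (fun a => a ≠ []) := by
  induction fps generalizing acc with
  | nil => simp
  | cons fp fps ih =>
    simp only [List.foldl_cons, List.map_cons, List.filter_cons, stepB]
    by_cases h : pvEmit fp = [] <;> simp [h, ih]

-- ===== VERDICT (by name: the statement is the Claim_ definition above) =====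
theorem extract_authorities_py_spec : Claim_equal_extract_authorities_py := by
  intro rich_case _ _
  unfold Spec_extract_authorities_py extract_authorities_py extract_authorities_py_alt
  simp only []
  rw [show ∀ (l : List (List (String × String)))
        (st : PySem.Set (String × String × String) × List (List (String × String))),
        l.foldl (fun st raw_entry =>
          let entry := PySem.Dict.ofList raw_entry
          let author := pvOptStr (entry.get? "author")
          let name := pvOptStr (entry.get? "author_name")
          let role := pvOptStr (entry.get? "role")
          let fingerprint := (author.getD "", name.getD "", role.getD "")
          if PySem.Set.contains st.1 fingerprint then st
          else
            let seen := PySem.Set.add st.1 fingerprint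
            let authority : List (String × String) := []
            let authority := match author with | some a => authority ++ [("github", a)] | none => authority
            let authority := match name with | some n => authority ++ [("name", n)] | none => authority
            let authority := match role with | some r => authority ++ [("role", r)] | none => authority
            if authority ≠ [] then (seen, st.2 ++ [authority]) else (seen, st.2)) st =
        (l.map pvFingerprint).foldl stepA st from fun l st => by
      rw [List.foldl_map]
      induction l generalizing st with
      | nil => rfl
      | cons e l ih => simp only [List.foldl_cons, step_eq]]
  rw [loop_eq]
  rw [show (PySem.Set.empty : PySem.Set (String × String × String)) = [] from rfl]
  rw [foldl_add_eq_filterDedup]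
  simp [foldl_stepB_eq]
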